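-- pv_equiv track=rewrite | github.com/razvande1395/it-school-homeworks | tema_average.py | sort_the_list
-- ===== SOURCE A (Python) =====
-- def sort_the_list(initial_list, avg):
--
--     below_avg_list = []
--     avg_list = []
--     above_avg_list = []
--
--     for i in range(len(initial_list)):
--         if initial_list[i] < avg:
--             below_avg_list.append(initial_list[i])
--         elif initial_list[i] == avg:
--             avg_list.append(initial_list[i])
--         else:
--             above_avg_list.append(initial_list[i])
--
--     return below_avg_list, avg_list, above_avg_list
-- ===== SOURCE B (Python) =====
-- def sort_the_list(initial_list, avg):
--     s = sorted(initial_list, key=lambda x: (x > avg) - (x < avg))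
--     nb = sum(1 for x in initial_list if x < avg)
--     ne = initial_list.count(avg)
--     return s[:nb], s[nb:nb + ne], s[nb + ne:]
-- ===== Notes on version B (the rewrite author's own statement) =====
-- stated objective: alternative
-- what changed: Replaces the single accumulating bucket loop by a stable sort on the three-valued comparison key (x>avg)-(x<avg) followed by counting and slicing the sorted list into the three segments.
import Mathlib
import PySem

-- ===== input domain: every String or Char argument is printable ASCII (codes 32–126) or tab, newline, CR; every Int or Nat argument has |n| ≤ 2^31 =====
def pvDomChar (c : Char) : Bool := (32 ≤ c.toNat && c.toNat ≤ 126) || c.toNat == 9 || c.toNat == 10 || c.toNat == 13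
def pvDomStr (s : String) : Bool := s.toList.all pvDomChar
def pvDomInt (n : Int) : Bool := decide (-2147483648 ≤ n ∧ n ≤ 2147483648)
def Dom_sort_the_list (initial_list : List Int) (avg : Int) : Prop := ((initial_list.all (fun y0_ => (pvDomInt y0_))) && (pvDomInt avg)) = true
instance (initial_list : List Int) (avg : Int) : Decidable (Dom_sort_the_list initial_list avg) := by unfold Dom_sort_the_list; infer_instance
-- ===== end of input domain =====

-- B replaces A's single accumulating bucket loop by a stable sort on the three-valued
-- comparison key followed by counting and slicing (same return value, alternative algorithm).

-- ===== PORT A =====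
-- the single index loop over range(len(initial_list)), carrying the three accumulator lists
def sort_the_list (initial_list : List Int) (avg : Int) : List Int × List Int × List Int :=
  (PySem.List.pyRange 0 (initial_list.length : Int) 1).foldl
    (fun (acc : List Int × List Int × List Int) i =>
      if PySem.List.pyGetD initial_list i 0 < avg then
        (acc.1 ++ [PySem.List.pyGetD initial_list i 0], acc.2.1, acc.2.2)
      else if PySem.List.pyGetD initial_list i 0 = avg then
        (acc.1, acc.2.1 ++ [PySem.List.pyGetD initial_list i 0], acc.2.2)
      else (acc.1, acc.2.1, acc.2.2 ++ [PySem.List.pyGetD initial_list i 0]))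
    ([], [], [])

-- ===== PORT B =====
-- the key (x > avg) - (x < avg) of Source B (Python bools counted as 0/1)
def pvKey (avg x : Int) : Int := (if avg < x then 1 else 0) - (if x < avg then 1 else 0)

-- stable sort by the three-valued key, count the below/equal elements, slice
def sort_the_list_alt (initial_list : List Int) (avg : Int) : List Int × List Int × List Int :=
  let s := PySem.List.sorted initial_list (pvKey avg) false
  let nb : Int := initial_list.foldl (fun acc x => if x < avg then acc + 1 else acc) 0
  let ne : Int := (PySem.List.count initial_list avg : Int)
  (PySem.List.slice s none (some nb),
   PySem.List.slice s (some nb) (some (nb + ne)),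
   PySem.List.slice s (some (nb + ne)) none)

-- ===== PRECONDITION & SPEC =====
def Spec_sort_the_list (initial_list : List Int) (avg : Int) (out : List Int × List Int × List Int) : Prop := out = sort_the_list_alt initial_list avg
instance (initial_list : List Int) (avg : Int) (out : List Int × List Int × List Int) : Decidable (Spec_sort_the_list initial_list avg out) := by unfold Spec_sort_the_list; infer_instance

-- ===== CLAIM (what is proved, stated in full; the proofs are below) =====
def Claim_equal_sort_the_list : Prop := ∀ (initial_list : List Int) (avg : Int), Dom_sort_the_list initial_list avg → Spec_sort_the_list initial_list avg (sort_the_list initial_list avg)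

-- ===== LEMMAS AND PROOFS =====

-- the canonical partition both algorithms compute
def pvPart (avg : Int) (xs : List Int) : List Int × List Int × List Int :=
  (xs.filter (fun x => x < avg), xs.filter (fun x => x = avg), xs.filter (fun x => avg < x))

-- A-side loop invariant: folding A's step over a list appends the three filters
theorem sort_fold_filter (avg : Int) (xs : List Int) (b e a : List Int) :
    xs.foldl
      (fun (acc : List Int × List Int × List Int) x =>
        if x < avg then (acc.1 ++ [x], acc.2.1, acc.2.2)
        else if x = avg then (acc.1, acc.2.1 ++ [x], acc.2.2)
        else (acc.1, acc.2.1, acc.2.2 ++ [x]))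
      (b, e, a)
    = (b ++ xs.filter (fun x => x < avg),
       e ++ xs.filter (fun x => x = avg),
       a ++ xs.filter (fun x => avg < x)) := by
  induction xs generalizing b e a with
  | nil => simp
  | cons x xs ih =>
    simp only [List.foldl_cons, List.filter_cons]
    by_cases h1 : x < avg
    · have h2 : ¬ x = avg := by omega
      have h3 : ¬ avg < x := by omega
      simp [h1, h2, h3, ih]
    · by_cases h2 : x = avg
      · have h3 : ¬ avg < x := by omega
        simp [h2, ih]
      · have h3 : avg < x := by omega
        simp [h1, h2, h3, ih]

-- insertBy skips a prefix none of whose elements come after x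
theorem insertBy_append_not {α : Type} (p : α → α → Bool) (x : α) (l r : List α)
    (h : ∀ y ∈ l, p x y = false) :
    PySem.List.insertBy p x (l ++ r) = l ++ PySem.List.insertBy p x r := by
  induction l with
  | nil => simp
  | cons y ys ih =>
    have hy : p x y = false := h y (by simp)
    have ih' := ih (fun w hw => h w (by simp [hw]))
    cases r with
    | nil =>
      simp only [List.cons_append, PySem.List.insertBy, hy, Bool.false_eq_true, if_false]
      simpa using ih'
    | cons z zs =>
      simp only [List.cons_append, PySem.List.insertBy, hy, Bool.false_eq_true, if_false]
      simp only [PySem.List.insertBy] at ih' ⊢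
      rw [ih']

-- insertBy puts x in front when every element comes after x
theorem insertBy_all_before {α : Type} (p : α → α → Bool) (x : α) (r : List α)
    (h : ∀ y ∈ r, p x y = true) :
    PySem.List.insertBy p x r = x :: r := by
  cases r with
  | nil => rfl
  | cons y ys =>
    have hy : p x y = true := h y (by simp)
    simp [PySem.List.insertBy, hy]

-- the stable sort by the three-valued key IS the concatenated partition
theorem sorted_key3 (avg : Int) (xs : List Int) :
    PySem.List.sorted xs (pvKey avg) false
      = xs.filter (fun x => x < avg) ++ xs.filter (fun x => x = avg)
          ++ xs.filter (fun x => avg < x) := by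
  rw [PySem.List.sorted_eq_foldl_insertBy]
  induction xs using List.reverseRecOn with
  | nil => simp
  | append_singleton xs x ih =>
    rw [List.foldl_append, List.foldl_cons, List.foldl_nil, ih]
    simp only [List.filter_append, List.filter_cons, List.filter_nil]
    set B := xs.filter (fun x => x < avg) with hB
    set E := xs.filter (fun x => x = avg) with hE
    set A := xs.filter (fun x => avg < x) with hA
    have keyB : ∀ y ∈ B, pvKey avg y = -1 := by
      intro y hy; have := (List.mem_filter.mp hy).2
      simp only [decide_eq_true_eq] at this
      simp [pvKey, this, show ¬ avg < y by omega]
    have keyE : ∀ y ∈ E, pvKey avg y = 0 := by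
      intro y hy; have := (List.mem_filter.mp hy).2
      simp only [decide_eq_true_eq] at this
      simp [pvKey, this]
    have keyA : ∀ y ∈ A, pvKey avg y = 1 := by
      intro y hy; have := (List.mem_filter.mp hy).2
      simp only [decide_eq_true_eq] at this
      simp [pvKey, this, show ¬ y < avg by omega]
    by_cases h1 : x < avg
    · have hk : pvKey avg x = -1 := by
        simp [pvKey, h1, show ¬ avg < x by omega]
      rw [show B ++ E ++ A = B ++ (E ++ A) by simp,
        insertBy_append_not _ x B (E ++ A)
          (fun y hy => by simp [hk, keyB y hy]),
        insertBy_all_before _ x (E ++ A)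
          (by intro y hy; rcases List.mem_append.mp hy with h | h
              · simp [hk, keyE y h]
              · simp [hk, keyA y h])]
      simp [h1, show ¬ x = avg by omega, show ¬ avg < x by omega]
    · by_cases h2 : x = avg
      · have hk : pvKey avg x = 0 := by simp [pvKey, h2]
        rw [show B ++ E ++ A = (B ++ E) ++ A by simp,
          insertBy_append_not _ x (B ++ E) A
            (by intro y hy; rcases List.mem_append.mp hy with h | h
                · simp [hk, keyB y h]
                · simp [hk, keyE y h]),
          insertBy_all_before _ x A (fun y hy => by simp [hk, keyA y hy])]
        simp [h2]
      · have h3 : avg < x := by omega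
        have hk : pvKey avg x = 1 := by
          simp [pvKey, h3, show ¬ x < avg by omega]
        rw [PySem.List.insertBy_of_forall_not_before _ x (B ++ E ++ A)
            (by intro y hy
                rcases List.mem_append.mp hy with h | h
                · rcases List.mem_append.mp h with h' | h'
                  · simp [hk, keyB y h']
                  · simp [hk, keyE y h']
                · simp [hk, keyA y h])]
        simp [h1, h2, h3]

-- ===== VERDICT (by name: the statement is the Claim_ definition above) =====
theorem sort_the_list_spec : Claim_equal_sort_the_list := by
  intro initial_list avg _
  unfold Spec_sort_the_list sort_the_list sort_the_list_alt
  rw [show ((initial_list.length : Int)) = PySem.List.len initial_list from rfl]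
  rw [PySem.List.foldl_pyRange_zero_pyGetD initial_list 0
      (fun (acc : List Int × List Int × List Int) x =>
        if x < avg then (acc.1 ++ [x], acc.2.1, acc.2.2)
        else if x = avg then (acc.1, acc.2.1 ++ [x], acc.2.2)
        else (acc.1, acc.2.1, acc.2.2 ++ [x])) ([], [], [])]
  rw [sort_fold_filter avg initial_list [] [] []]
  simp only []
  rw [sorted_key3 avg initial_list]
  set B := initial_list.filter (fun x => x < avg) with hB
  set E := initial_list.filter (fun x => x = avg) with hE
  set A := initial_list.filter (fun x => avg < x) with hA
  have hnb : initial_list.foldl (fun acc x => if x < avg then acc + 1 else acc) (0 : Int)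
      = (B.length : Int) := by
    rw [PySem.List.foldl_ite_add_one (fun x => x < avg) initial_list 0, hB]
    simp [List.countP_eq_length_filter]
  have hne : (PySem.List.count initial_list avg : Int) = (E.length : Int) := by
    have : List.countP (fun x => x == avg) initial_list
        = List.countP (fun x => decide (x = avg)) initial_list :=
      List.countP_congr (fun x _ => by simp)
    simp only [PySem.List.count, hE, List.count, ← List.countP_eq_length_filter, this]
  rw [hnb, hne]
  rw [show (B.length : Int) + (E.length : Int) = ((B.length + E.length : Nat) : Int) by push_cast; ring]
  rw [PySem.List.slice_to_natCast, PySem.List.slice_from_natCast]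
  rw [show ((B.length : Int)) = ((B.length : Nat) : Int) from rfl]
  rw [show ((B.length + E.length : Nat) : Int) = ((B.length : Nat) : Int) + ((E.length : Nat) : Int) by push_cast; ring]
  rw [PySem.List.slice_natCast_add]
  rw [List.append_assoc]
  simp only [Prod.mk.injEq]
  refine ⟨?_, ?_, ?_⟩
  · simp
  · simp
  · rw [← List.drop_drop]
    simp
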